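/- GENERATED by mk_final_copies.py from the proof of the farm's unit `vorbis_decode_packet_rest.3a` (farm:vorbis_decode_packet_rest.3a.1: Proof.lean) as the
   re-elaboration sweep compiled it — do not edit. -/
import Vorbis.Spec.Units.vorbis_decode_packet_rest_3a
import Vorbis.Spec.Worked.vorbis_decode_packet_rest_3a_Lemmas

open X86 X86.User Asan Vorbis Vorbis.Spec Vorbis.Spec.vorbis_decode_packet_rest

/-- Unit `vorbis_decode_packet_rest.3a`: the head of the partition loop (0x110e7e–0x110f35: `j ≥ partitions` → `At5`; the four spills;
`cbits = 0` → `At4` through 0x110e5b–0x110e6f) and the refill of the inline DECODE_RAW (0x110c5d–0x110c65: prep_huffman) up to the join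
0x110f3b (`At3Mid`). The two walks are `head_reach` and `refill_reach` of Lemmas.lean, chained in `seg3a_reach`. -/
theorem Vorbis.Spec.Worked.vorbis_decode_packet_rest_3a_ok : Vorbis.Spec.vorbis_decode_packet_rest_3a.Statement := by
  intro Lay hLay μ hμ u₀ hcode h_prep hl1 hl8 hl4
  exact Vorbis.Spec.vorbis_decode_packet_rest_3a.seg3a_reach Lay hLay μ hμ u₀ hcode h_prep hl1 hl8 hl4
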